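-- pv_equiv track=rewrite | github.com/aosullivan/dechen_study | tools/fix_verse_markers.py | _tokens_contiguous_subseq
-- ===== SOURCE A (Python) =====
-- def _tokens_contiguous_subseq(shorter: list[str], longer: list[str]) -> bool:
--     """True if `shorter` appears contiguously inside `longer`."""
--     if not shorter:
--         return False
--     if len(shorter) > len(longer):
--         return False
--     n = len(shorter)
--     for i in range(len(longer) - n + 1):
--         if longer[i:i + n] == shorter:
--             return True
--     return False
-- ===== SOURCE B (Python) =====
-- def _tokens_contiguous_subseq(shorter: list[str], longer: list[str]) -> bool:
--     """True if `shorter` appears contiguously inside `longer`.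
--
--     Shift-And bit-parallel search: preprocess a bitmask per token of
--     `shorter`, then a single pass over `longer` updating one integer state
--     whose bit j means 'shorter[:j+1] is a suffix of the tokens seen so far'.
--     """
--     if not shorter:
--         return False
--     bits = {}
--     for j, tok in enumerate(shorter):
--         bits[tok] = bits.get(tok, 0) | (1 << j)
--     goal = 1 << (len(shorter) - 1)
--     state = 0
--     for tok in longer:
--         state = ((state << 1) | 1) & bits.get(tok, 0)
--         if state & goal:
--             return True
--     return False
-- ===== Notes on version B (the rewrite author's own statement) =====
-- stated objective: alternative
-- what changed: B replaces A's sliding-window loop of per-position slice comparisons by the Shift-And bit-parallel algorithm: a preprocessing pass builds one bitmask per distinct token of `shorter`, then a single pass over `longer` maintains one integer automaton state whose bit j is set iff shorter[:j+1] is a suffix of the tokens read so far.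
import Mathlib
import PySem

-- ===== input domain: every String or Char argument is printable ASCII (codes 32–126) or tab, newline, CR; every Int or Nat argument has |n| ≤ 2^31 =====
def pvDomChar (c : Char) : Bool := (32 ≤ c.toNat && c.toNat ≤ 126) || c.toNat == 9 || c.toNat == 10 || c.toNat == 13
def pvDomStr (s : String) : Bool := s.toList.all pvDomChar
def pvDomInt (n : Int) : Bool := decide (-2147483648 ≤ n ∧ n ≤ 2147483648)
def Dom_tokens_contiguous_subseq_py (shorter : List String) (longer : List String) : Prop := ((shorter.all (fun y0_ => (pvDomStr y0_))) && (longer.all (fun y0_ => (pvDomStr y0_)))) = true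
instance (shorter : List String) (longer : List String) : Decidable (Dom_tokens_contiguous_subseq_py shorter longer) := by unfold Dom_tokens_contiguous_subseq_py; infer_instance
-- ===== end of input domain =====

-- B replaces A's sliding-window slice comparisons by the Shift-And bit-parallel algorithm
-- (a bitmask per distinct token, then one automaton state updated per token of `longer`).

-- ===== PORT A =====
-- the 'for i in range(...): if longer[i:i+n] == shorter: return True' loop
def goA (shorter longer : List String) (n : Int) : List Int → Bool
  | [] => false
  | i :: rest =>
      if PySem.List.slice longer (some i) (some (i + n)) = shorter then true
      else goA shorter longer n rest

def tokens_contiguous_subseq_py (shorter : List String) (longer : List String) : Bool :=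
  if shorter = [] then false
  else if (shorter.length : Int) > (longer.length : Int) then false
  else
    goA shorter longer (shorter.length : Int)
      (PySem.List.pyRange 0 ((longer.length : Int) - (shorter.length : Int) + 1) 1)

-- ===== PORT B =====
-- the 'for j, tok in enumerate(shorter): bits[tok] = bits.get(tok, 0) | (1 << j)' loop
def buildB (d : PySem.Dict String Nat) (j : Nat) : List String → PySem.Dict String Nat
  | [] => d
  | t :: rest => buildB (d.insert t (d.getD t 0 ||| (1 <<< j))) (j + 1) rest

-- the 'for tok in longer: state = ((state << 1) | 1) & bits.get(tok, 0); if state & goal: return True' loop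
def scanB (bits : PySem.Dict String Nat) (goal : Nat) (state : Nat) : List String → Bool
  | [] => false
  | t :: rest =>
      let s' := ((state <<< 1) ||| 1) &&& bits.getD t 0
      if s' &&& goal ≠ 0 then true else scanB bits goal s' rest

def tokens_contiguous_subseq_py_alt (shorter : List String) (longer : List String) : Bool :=
  if shorter = [] then false
  else
    scanB (buildB PySem.Dict.empty 0 shorter) (1 <<< (shorter.length - 1)) 0 longer

-- ===== PRECONDITION & SPEC =====
def Spec_tokens_contiguous_subseq_py (shorter : List String) (longer : List String) (out : Bool) : Prop := out = tokens_contiguous_subseq_py_alt shorter longer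
instance (shorter : List String) (longer : List String) (out : Bool) : Decidable (Spec_tokens_contiguous_subseq_py shorter longer out) := by unfold Spec_tokens_contiguous_subseq_py; infer_instance

-- ===== CLAIM (what is proved, stated in full; the proofs are below) =====
def Claim_equal_tokens_contiguous_subseq_py : Prop := ∀ (shorter : List String) (longer : List String), Dom_tokens_contiguous_subseq_py shorter longer → Spec_tokens_contiguous_subseq_py shorter longer (tokens_contiguous_subseq_py shorter longer)

-- ===== LEMMAS AND PROOFS =====

-- bit arithmetic
theorem and_shiftLeft_ne_zero_iff (x k : Nat) : (x &&& (1 <<< k) ≠ 0) ↔ x.testBit k := by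
  rw [Nat.one_shiftLeft, Nat.and_two_pow]
  cases h : x.testBit k <;> simp <;> positivity

-- a nonempty suffix of p ++ [t] is l' ++ [t] with l' a suffix of p
theorem suffix_concat_iff {α : Type} (p : List α) (t : α) (l : List α) (h : l ≠ []) :
    l <:+ p ++ [t] ↔ ∃ l', l = l' ++ [t] ∧ l' <:+ p := by
  constructor
  · rintro ⟨s, hs⟩
    rcases List.eq_nil_or_concat l with rfl | ⟨l', x, rfl⟩
    · exact absurd rfl h
    · rw [List.concat_eq_append, ← List.append_assoc] at hs
      rw [List.concat_eq_append]
      obtain ⟨h1, h2⟩ := List.append_inj' hs (by simp)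
      simp only [List.cons.injEq, and_true] at h2
      exact ⟨l', by rw [h2], s, h1⟩
  · rintro ⟨l', rfl, s, rfl⟩
    exact ⟨s, by simp⟩

-- characterization of the bitmask table
theorem buildB_spec (rest : List String) (d : PySem.Dict String Nat) (k : Nat)
    (hd : ∀ t b, (d.getD t 0).testBit b → b < k) (t : String) (b : Nat) :
    ((buildB d k rest).getD t 0).testBit b ↔
      ((d.getD t 0).testBit b ∨ (k ≤ b ∧ rest[b - k]? = some t)) := by
  induction rest generalizing d k with
  | nil => simp [buildB]
  | cons t0 rest ih =>
    rw [buildB]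
    rw [ih _ (k + 1) ?_]
    · rw [PySem.Dict.getD_insert]
      by_cases ht : t = t0
      · subst ht
        rw [if_pos rfl]
        simp only [Nat.testBit_or]
        rw [Nat.one_shiftLeft, Nat.testBit_two_pow]
        rcases Nat.lt_trichotomy b k with hb | rfl | hb
        · have h2 : ¬ (k ≤ b) := by omega
          have h3 : ¬ (k + 1 ≤ b) := by omega
          simp [h2, h3, show ¬ (k = b) by omega]
        · have h0 : (d.getD t 0).testBit b = false := by
            cases h : (d.getD t 0).testBit b
            · rfl
            · exact absurd (hd t b h) (by omega)
          simp [h0, show ¬ (b + 1 ≤ b) by omega]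
        · have hk : b - k = (b - (k+1)) + 1 := by omega
          simp [show k ≤ b by omega, show k + 1 ≤ b by omega, show k ≠ b by omega, hk]
      · rw [if_neg ht]
        have h0k : ∀ b', k ≤ b' → (d.getD t 0).testBit b' = false := by
          intro b' hb'
          cases h : (d.getD t 0).testBit b'
          · rfl
          · exact absurd (hd t b' h) (by omega)
        by_cases hb : k ≤ b
        · rcases Nat.eq_or_lt_of_le hb with heq | hb'
          · subst heq
            have hX := h0k k le_rfl
            have hidx : ((t0 :: rest)[k - k]? = some t) ↔ False := by
              rw [Nat.sub_self]
              simp only [List.getElem?_cons_zero, Option.some.injEq, iff_false]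
              exact fun h => ht h.symm
            simp [hX, show ¬ (k + 1 ≤ k) by omega, hidx]
            exact fun h => ht h.symm
          · have hk : b - k = (b - (k + 1)) + 1 := by omega
            simp [hb, show k + 1 ≤ b by omega, hk]
        · simp [hb, show ¬ (k + 1 ≤ b) by omega]
    · intro t' b' h'
      rw [PySem.Dict.getD_insert] at h'
      by_cases ht' : t' = t0
      · rw [if_pos ht'] at h'
        rw [Nat.testBit_or, Nat.one_shiftLeft, Nat.testBit_two_pow] at h'
        rcases Bool.or_eq_true_iff.mp h' with h' | h'
        · exact Nat.lt_succ_of_lt (hd _ _ h')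
        · simp at h'; omega
      · rw [if_neg ht'] at h'
        exact Nat.lt_succ_of_lt (hd _ _ h')

theorem bits_spec (shorter : List String) (t : String) (b : Nat) :
    ((buildB PySem.Dict.empty 0 shorter).getD t 0).testBit b ↔ shorter[b]? = some t := by
  rw [buildB_spec shorter PySem.Dict.empty 0 (by simp [PySem.Dict.getD_empty]) t b]
  simp [PySem.Dict.getD_empty]

-- the automaton invariant: bit j of the state ⟺ shorter[:j+1] is a suffix of the processed prefix
def InvB (shorter p : List String) (state : Nat) : Prop :=
  ∀ j, state.testBit j = true ↔ (j < shorter.length ∧ shorter.take (j + 1) <:+ p)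

theorem invB_step (shorter p : List String) (t : String) (state : Nat)
    (hinv : InvB shorter p state) :
    InvB shorter (p ++ [t]) (((state <<< 1) ||| 1) &&& (buildB PySem.Dict.empty 0 shorter).getD t 0) := by
  intro j
  rw [Nat.testBit_and, Nat.testBit_or, Nat.testBit_shiftLeft]
  rw [Bool.and_eq_true, Bool.or_eq_true, Bool.and_eq_true]
  rw [bits_spec]
  have hone : (1 : Nat).testBit j = decide (0 = j) := by
    rw [show (1 : Nat) = 2 ^ 0 by norm_num, Nat.testBit_two_pow]
  rw [hone]
  constructor
  · rintro ⟨hl, hj⟩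
    have hjn : j < shorter.length := by
      by_contra hc
      rw [List.getElem?_eq_none (by omega)] at hj
      simp at hj
    refine ⟨hjn, ?_⟩
    have htake : shorter.take (j + 1) = shorter.take j ++ [t] := by
      rw [List.take_succ, hj]; rfl
    rw [suffix_concat_iff p t _ (by simp [htake]), htake]
    refine ⟨shorter.take j, rfl, ?_⟩
    rcases hl with ⟨hle, hbit⟩ | h0
    · have hle' : 1 ≤ j := by simpa using hle
      have := (hinv (j - 1)).mp hbit
      have : shorter.take (j - 1 + 1) <:+ p := this.2
      rwa [show j - 1 + 1 = j by omega] at this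
    · have : j = 0 := by have := of_decide_eq_true h0; omega
      subst this; simp
  · rintro ⟨hjn, hsuf⟩
    have hne : shorter.take (j + 1) ≠ [] := by
      intro hc
      rcases List.take_eq_nil_iff.mp hc with h | h
      · omega
      · rw [h] at hjn; simp at hjn
    rw [suffix_concat_iff p t _ hne] at hsuf
    obtain ⟨l', heq, hsuf'⟩ := hsuf
    have hj : shorter[j]? = some t := by
      have htake : shorter.take (j + 1) = shorter.take j ++ shorter[j]?.toList := List.take_succ
      rw [htake] at heq
      cases hgj : shorter[j]? with
      | none => rw [List.getElem?_eq_none_iff] at hgj; omega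
      | some x =>
        rw [hgj] at heq
        obtain ⟨h1, h2⟩ := List.append_inj' heq (by simp)
        simp only [Option.toList_some, List.cons.injEq] at h2
        rw [h2.1]
    refine ⟨?_, hj⟩
    by_cases h0 : j = 0
    · right; simp [h0]
    · left
      refine ⟨by simpa using Nat.one_le_iff_ne_zero.mpr h0, ?_⟩
      have htake : shorter.take (j + 1) = shorter.take j ++ [t] := by
        rw [List.take_succ, hj]; rfl
      rw [htake] at heq
      obtain ⟨h1, _⟩ := List.append_inj' heq (by simp)
      rw [(hinv (j - 1))]
      refine ⟨by omega, ?_⟩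
      rw [show j - 1 + 1 = j by omega, h1]
      exact hsuf'

theorem scanB_iff (shorter : List String) (hne : shorter ≠ []) (rest p : List String) (state : Nat)
    (hinv : InvB shorter p state) :
    scanB (buildB PySem.Dict.empty 0 shorter) (1 <<< (shorter.length - 1)) state rest = true ↔
      ∃ q, q ≠ [] ∧ q <+: rest ∧ shorter <:+ p ++ q := by
  induction rest generalizing p state with
  | nil =>
    simp only [scanB, Bool.false_eq_true, false_iff]
    rintro ⟨q, hq, hpre, _⟩
    exact hq (List.prefix_nil.mp hpre)
  | cons t rest ih =>
    have hn1 : shorter.length - 1 < shorter.length := by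
      have := List.length_pos_of_ne_nil hne; omega
    have hstep := invB_step shorter p t state hinv
    rw [scanB]
    set s' := ((state <<< 1) ||| 1) &&& (buildB PySem.Dict.empty 0 shorter).getD t 0 with hs'
    have hcond : (s' &&& (1 <<< (shorter.length - 1)) ≠ 0) ↔ shorter <:+ p ++ [t] := by
      rw [and_shiftLeft_ne_zero_iff, hstep (shorter.length - 1)]
      rw [show shorter.length - 1 + 1 = shorter.length by omega, List.take_length]
      constructor
      · exact fun h => h.2
      · exact fun h => ⟨hn1, h⟩
    split_ifs with h
    · simp only [true_iff]
      exact ⟨[t], by simp, ⟨rest, rfl⟩, hcond.mp h⟩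
    · rw [ih (p ++ [t]) s' hstep]
      constructor
      · rintro ⟨q, hq, hpre, hsuf⟩
        exact ⟨t :: q, by simp, List.cons_prefix_cons.mpr ⟨rfl, hpre⟩, by simpa using hsuf⟩
      · rintro ⟨q, hq, hpre, hsuf⟩
        rcases q with _ | ⟨t', q'⟩
        · exact absurd rfl hq
        · obtain ⟨hts, hpre'⟩ := List.cons_prefix_cons.mp hpre
          subst hts
          rcases q' with _ | _
          · exact absurd (by simpa using hsuf) (fun hc => h (hcond.mpr hc))
          · exact ⟨_, by simp, hpre', by simpa using hsuf⟩

-- A's sliding window, as infix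
theorem infix_iff_drop_take (shorter longer : List String) :
    shorter <:+: longer ↔
      ∃ i : Nat, i + shorter.length ≤ longer.length ∧
        (longer.drop i).take shorter.length = shorter := by
  constructor
  · rintro ⟨s, t2, rfl⟩
    refine ⟨s.length, by simp, ?_⟩
    rw [List.append_assoc, List.drop_left' rfl, List.take_left' rfl]
  · rintro ⟨i, hle, heq⟩
    refine ⟨longer.take i, (longer.drop i).drop shorter.length, ?_⟩
    calc longer.take i ++ shorter ++ (longer.drop i).drop shorter.length
        = longer.take i ++ ((longer.drop i).take shorter.length ++ (longer.drop i).drop shorter.length) := by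
          rw [heq, List.append_assoc]
      _ = longer.take i ++ longer.drop i := by rw [List.take_append_drop]
      _ = longer := List.take_append_drop ..

theorem goA_iff (shorter longer : List String) (n : Int) (l : List Int) :
    goA shorter longer n l = true ↔
      ∃ i ∈ l, PySem.List.slice longer (some i) (some (i + n)) = shorter := by
  induction l with
  | nil => simp [goA]
  | cons i rest ih =>
    simp only [goA]
    split_ifs with h
    · simp [h]
    · rw [ih]; simp [h]

theorem a_iff (shorter longer : List String) :
    tokens_contiguous_subseq_py shorter longer = true ↔ (shorter ≠ [] ∧ shorter <:+: longer) := by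
  unfold tokens_contiguous_subseq_py
  by_cases hp : shorter = []
  · simp [hp]
  · rw [if_neg hp]
    by_cases hle : shorter.length ≤ longer.length
    · rw [if_neg (by omega)]
      rw [goA_iff, infix_iff_drop_take]
      simp only [ne_eq, hp, not_false_eq_true, true_and]
      constructor
      · rintro ⟨i, hmem, hslice⟩
        rw [PySem.List.mem_pyRange_one] at hmem
        obtain ⟨hi0, hiub⟩ := hmem
        have hieq : i = ((i.toNat : Nat) : Int) := (Int.toNat_of_nonneg hi0).symm
        rw [hieq, PySem.List.slice_natCast_add] at hslice
        exact ⟨i.toNat, by omega, hslice⟩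
      · rintro ⟨i, hb, heq⟩
        refine ⟨(i : Int), ?_, ?_⟩
        · rw [PySem.List.mem_pyRange_one]
          exact ⟨Int.natCast_nonneg _, by omega⟩
        · rw [PySem.List.slice_natCast_add]; exact heq
    · rw [if_pos (by omega)]
      simp only [Bool.false_eq_true, false_iff, not_and]
      intro _ hinf
      exact hle (hinf.length_le)

theorem b_iff (shorter longer : List String) :
    tokens_contiguous_subseq_py_alt shorter longer = true ↔ (shorter ≠ [] ∧ shorter <:+: longer) := by
  unfold tokens_contiguous_subseq_py_alt
  by_cases hp : shorter = []
  · simp [hp]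
  · rw [if_neg hp]
    have hinv0 : InvB shorter [] 0 := by
      intro j
      simp only [Nat.zero_testBit, Bool.false_eq_true, false_iff, not_and]
      intro hj hsuf
      have := List.suffix_nil.mp hsuf
      rw [List.take_eq_nil_iff] at this
      rcases this with h | h
      · omega
      · exact hp h
    rw [scanB_iff shorter hp longer [] 0 hinv0]
    simp only [List.nil_append, ne_eq, hp, not_false_eq_true, true_and]
    constructor
    · rintro ⟨q, _, hpre, hsuf⟩
      exact hsuf.isInfix.trans hpre.isInfix
    · rintro ⟨s, t2, rfl⟩
      refine ⟨s ++ shorter, by simp [hp], ⟨t2, by simp⟩, ⟨s, rfl⟩⟩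

-- ===== VERDICT (by name: the statement is the Claim_ definition above) =====
theorem tokens_contiguous_subseq_py_spec : Claim_equal_tokens_contiguous_subseq_py := by
  intro shorter longer _
  show tokens_contiguous_subseq_py shorter longer = tokens_contiguous_subseq_py_alt shorter longer
  rw [Bool.eq_iff_iff, a_iff, b_iff]
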